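-- pv_equiv track=rewrite | github.com/georgeherbert/rugby-tournament-system | utils/organise.py | calcTeamsOnPitchesCombos
-- ===== SOURCE A (Python) =====
-- def calcNumOfTeamsOnPitches(numOfTeams, numOfPitches):
--     # Initially spreads the number of teams evenly across the groups
--     minTeamsPerPitch = numOfTeams // numOfPitches
--     teamsRemaining = numOfTeams - (minTeamsPerPitch * numOfPitches)
--     numOfTeamsOnPitches = [minTeamsPerPitch] * numOfPitches
--
--     # Assigns the remaining teams to the groups, starting at the first group
--     i = 0
--     while teamsRemaining != 0:
--         numOfTeamsOnPitches[i] += 1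
--         teamsRemaining -= 1
--         i += 1
--
--     return numOfTeamsOnPitches
--
-- def calcTeamsOnPitchesCombos(numOfTeams, numOfPitches, numOfTimeslots):
--     # Possible layouts will be added to this list
--     combos = []
--
--     # Each pitch within a timeslot is known as a group
--     numOfGroups = numOfPitches * numOfTimeslots
--
--     # Finds all possible layouts for the given number of timeslots
--     for i in range(numOfTimeslots, numOfTimeslots + numOfPitches):
--         # Finds the combo for the number of teams and number of groups
--         combo = calcNumOfTeamsOnPitches(numOfTeams, numOfGroups)
--
--         # Assumes the combo to be valid
--         validCombo = True
--
--         # For each group in the combo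
--         for i in combo:
--             # If there is more than 5 teams in the group the combo isn't valid
--             if i > 5:
--                 validCombo = False
--         # If there is 2 or 1 or 0 teams in a group the combo isn't valid
--         if 2 in combo or 1 in combo or 0 in combo:
--             validCombo = False
--
--         # If the combo is valid add it
--         if validCombo == True:
--             combos.append(combo)
--
--         # Reduce the number of groups by 1 to find other potential combos
--         numOfGroups -= 1
--
--     return combos
-- ===== SOURCE B (Python) =====
-- def calcTeamsOnPitchesCombos(numOfTeams, numOfPitches, numOfTimeslots):
--     # Division-free reformulation: a group count g admits a valid even layout
--     # iff 3*g <= numOfTeams <= 5*g; the common group size s is located by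
--     # comparing numOfTeams with 4*g and 5*g, and the counts of (s+1)-sized and
--     # s-sized groups fall out as the linear expressions numOfTeams - s*g and
--     # (s+1)*g - numOfTeams.
--     combos = []
--     hi = numOfPitches * numOfTimeslots
--     for g in range(hi, hi - numOfPitches, -1):
--         if 3 * g <= numOfTeams <= 5 * g:
--             s = 3 if numOfTeams < 4 * g else 4 if numOfTeams < 5 * g else 5
--             combos.append([s + 1] * (numOfTeams - s * g) + [s] * ((s + 1) * g - numOfTeams))
--     return combos
-- ===== Notes on version B (the rewrite author's own statement) =====
-- stated objective: faster
-- what changed: B is division-free: instead of A's floor-division, one-team-at-a-time remainder-increment loop and two validity scans over each built combo, B decides validity of a group count g by the interval test 3*g <= teams <= 5*g, locates the base size s by comparing teams with 4*g and 5*g, and writes the combo directly as [s+1]*(teams-s*g)+[s]*((s+1)*g-teams).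
-- outside the precondition, e.g. on calcTeamsOnPitchesCombos(-4, 2, 1): A returns [[-2, -2], [-4]], B returns []; on calcTeamsOnPitchesCombos(0, 1, -1): A returns [[]], B returns []
import Mathlib
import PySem

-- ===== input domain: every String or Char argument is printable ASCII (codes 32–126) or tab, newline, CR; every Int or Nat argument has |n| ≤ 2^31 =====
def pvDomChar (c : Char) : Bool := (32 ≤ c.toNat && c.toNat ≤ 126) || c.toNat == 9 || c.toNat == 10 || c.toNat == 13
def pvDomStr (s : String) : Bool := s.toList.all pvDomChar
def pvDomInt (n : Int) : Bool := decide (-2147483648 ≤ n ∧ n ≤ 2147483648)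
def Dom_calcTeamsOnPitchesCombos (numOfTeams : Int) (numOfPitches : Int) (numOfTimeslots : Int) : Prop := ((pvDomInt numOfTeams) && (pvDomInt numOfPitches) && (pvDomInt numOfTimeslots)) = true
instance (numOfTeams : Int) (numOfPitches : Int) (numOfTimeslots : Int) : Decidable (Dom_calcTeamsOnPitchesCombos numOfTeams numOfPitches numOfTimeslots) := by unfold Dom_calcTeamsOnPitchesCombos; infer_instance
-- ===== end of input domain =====

-- B drops A's floor-division/increment-spreading helper and its two validity scans for a
-- division-free interval test 3g ≤ teams ≤ 5g and a direct linear construction of each combo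
-- (objective: faster by a constant mechanism). Return-value equivalence on Pre_ only.


-- ===== PORT A =====
-- the 'while teamsRemaining != 0' loop; inside Pre_ the remainder is nonnegative, so .toNat fuel is exact
def pvIncLoop (lst : List Int) (rem : Nat) (i : Nat) : List Int :=
  match rem with
  | 0 => lst
  | Nat.succ r => pvIncLoop (lst.set i (lst.getD i 0 + 1)) r (i + 1)

def calcNumOfTeamsOnPitches (numOfTeams : Int) (numOfPitches : Int) : List Int :=
  let minTeamsPerPitch := PySem.Int.floordiv numOfTeams numOfPitches
  let teamsRemaining := numOfTeams - minTeamsPerPitch * numOfPitches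
  pvIncLoop (List.replicate numOfPitches.toNat minTeamsPerPitch) teamsRemaining.toNat 0

def pvStepA (numOfTeams : Int) (st : List (List Int) × Int) (_ : Int) : List (List Int) × Int :=
  let combo := calcNumOfTeamsOnPitches numOfTeams st.2
  let valid := combo.foldl (fun v x => if x > 5 then false else v) true
  let valid := if combo.contains 0 || combo.contains 1 || combo.contains 2 then false else valid
  (if valid then st.1 ++ [combo] else st.1, st.2 - 1)

def calcTeamsOnPitchesCombos (numOfTeams : Int) (numOfPitches : Int) (numOfTimeslots : Int) : List (List Int) :=
  ((PySem.List.pyRange numOfTimeslots (numOfTimeslots + numOfPitches) 1).foldl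
    (pvStepA numOfTeams) ([], numOfPitches * numOfTimeslots)).1

-- ===== PORT B =====
def pvStepB (numOfTeams : Int) (combos : List (List Int)) (g : Int) : List (List Int) :=
  if 3 * g ≤ numOfTeams ∧ numOfTeams ≤ 5 * g then
    let s : Int := if numOfTeams < 4 * g then 3 else if numOfTeams < 5 * g then 4 else 5
    combos ++ [List.replicate (numOfTeams - s * g).toNat (s + 1)
                ++ List.replicate ((s + 1) * g - numOfTeams).toNat s]
  else combos

def calcTeamsOnPitchesCombos_alt (numOfTeams : Int) (numOfPitches : Int) (numOfTimeslots : Int) : List (List Int) :=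
  (PySem.List.pyRange (numOfPitches * numOfTimeslots) (numOfPitches * numOfTimeslots - numOfPitches) (-1)).foldl
    (pvStepB numOfTeams) []

-- ===== PRECONDITION & SPEC =====
-- Pre_ restricts, whenever any groups are formed (numOfPitches ≥ 1), to at least one timeslot —
-- otherwise the group count reaches 0 or below, where A raises ZeroDivisionError/IndexError except
-- on accidental divisibility corners — and to team counts at least p - p*s (the threshold below
-- which A returns layouts of negative-sized groups), negative team counts being outside the
-- function's purpose.
def Pre_calcTeamsOnPitchesCombos (numOfTeams : Int) (numOfPitches : Int) (numOfTimeslots : Int) : Prop :=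
  numOfPitches ≤ 0 ∨ (1 ≤ numOfTimeslots ∧ numOfPitches - numOfPitches * numOfTimeslots ≤ numOfTeams)
instance (numOfTeams : Int) (numOfPitches : Int) (numOfTimeslots : Int) : Decidable (Pre_calcTeamsOnPitchesCombos numOfTeams numOfPitches numOfTimeslots) := by unfold Pre_calcTeamsOnPitchesCombos; infer_instance
def pvWitness_calcTeamsOnPitchesCombos : Int × Int × Int := (8, 2, 1)

def Spec_calcTeamsOnPitchesCombos (numOfTeams : Int) (numOfPitches : Int) (numOfTimeslots : Int) (out : List (List Int)) : Prop := out = calcTeamsOnPitchesCombos_alt numOfTeams numOfPitches numOfTimeslots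
instance (numOfTeams : Int) (numOfPitches : Int) (numOfTimeslots : Int) (out : List (List Int)) : Decidable (Spec_calcTeamsOnPitchesCombos numOfTeams numOfPitches numOfTimeslots out) := by unfold Spec_calcTeamsOnPitchesCombos; infer_instance

-- ===== CLAIM (what is proved, stated in full; the proofs are below) =====
def Claim_equal_calcTeamsOnPitchesCombos : Prop := ∀ (numOfTeams : Int) (numOfPitches : Int) (numOfTimeslots : Int), Dom_calcTeamsOnPitchesCombos numOfTeams numOfPitches numOfTimeslots → Pre_calcTeamsOnPitchesCombos numOfTeams numOfPitches numOfTimeslots → Spec_calcTeamsOnPitchesCombos numOfTeams numOfPitches numOfTimeslots (calcTeamsOnPitchesCombos numOfTeams numOfPitches numOfTimeslots)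

-- ===== LEMMAS AND PROOFS =====

theorem repl_cons {α : Type} (x : α) : ∀ (a : Nat) (l : List α),
    List.replicate a x ++ x :: l = x :: (List.replicate a x ++ l) := by
  intro a l
  induction a with
  | zero => simp
  | succ a ih => simp [List.replicate_succ, ih]

theorem pvIncLoop_eq (m : Int) : ∀ (r b a : Nat), r ≤ b →
    pvIncLoop (List.replicate a (m + 1) ++ List.replicate b m) r a
      = List.replicate (a + r) (m + 1) ++ List.replicate (b - r) m := by
  intro r
  induction r with
  | zero => intro b a _; simp [pvIncLoop]
  | succ r ih =>
    intro b a hrb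
    obtain ⟨b', rfl⟩ : ∃ b', b = b' + 1 := ⟨b - 1, by omega⟩
    have hget : (List.replicate a (m + 1) ++ List.replicate (b' + 1) m).getD a 0 = m := by
      rw [List.getD_eq_getElem?_getD, List.getElem?_append_right (by simp)]
      simp
    have hset : (List.replicate a (m + 1) ++ List.replicate (b' + 1) m).set a (m + 1)
        = List.replicate (a + 1) (m + 1) ++ List.replicate b' m := by
      rw [List.set_append]
      simp [List.replicate_succ, repl_cons]
    rw [pvIncLoop, hget, hset]
    have := ih b' (a + 1) (by omega)
    rw [this]
    congr 1 <;> [skip; simp] <;> congr 1 <;> omega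

theorem calcNum_closed (t g : Int) (hg : 1 ≤ g) :
    calcNumOfTeamsOnPitches t g
      = List.replicate (PySem.Int.mod t g).toNat (PySem.Int.floordiv t g + 1)
          ++ List.replicate (g - PySem.Int.mod t g).toNat (PySem.Int.floordiv t g) := by
  have hrem : t - PySem.Int.floordiv t g * g = PySem.Int.mod t g := by
    have := PySem.Int.floordiv_mul_add_mod t g
    omega
  have hr0 : 0 ≤ PySem.Int.mod t g := by
    rw [PySem.Int.mod_eq_emod_of_pos (by omega : (0:Int) < g)]
    exact Int.emod_nonneg t (by omega)
  have hrg : PySem.Int.mod t g < g := by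
    rw [PySem.Int.mod_eq_emod_of_pos (by omega : (0:Int) < g)]
    exact Int.emod_lt_of_pos t (by omega)
  show pvIncLoop (List.replicate g.toNat (PySem.Int.floordiv t g))
      (t - PySem.Int.floordiv t g * g).toNat 0 = _
  rw [hrem]
  have h := pvIncLoop_eq (PySem.Int.floordiv t g) (PySem.Int.mod t g).toNat g.toNat 0 (by omega)
  simp only [List.replicate_zero, List.nil_append, Nat.zero_add] at h
  rw [h]
  have : g.toNat - (PySem.Int.mod t g).toNat = (g - PySem.Int.mod t g).toNat := by omega
  rw [this]

theorem foldl_valid : ∀ (l : List Int) (v : Bool),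
    l.foldl (fun v x => if x > 5 then false else v) v = (v && l.all (fun x => decide (x ≤ 5))) := by
  intro l
  induction l with
  | nil => intro v; simp
  | cons a l ih =>
    intro v
    rw [List.foldl_cons, ih, List.all_cons]
    by_cases h : a > 5
    · simp [h, show ¬(a ≤ 5) by omega]
    · simp [h, show a ≤ 5 by omega]

theorem pv_ge_iff (g mn r k : Int) (hg : 1 ≤ g) (hr0 : 0 ≤ r) (hrg : r < g) :
    k * g ≤ mn * g + r ↔ k ≤ mn := by
  constructor
  · intro h
    by_contra hlt
    have h2 : (mn + 1) * g ≤ k * g := Int.mul_le_mul_of_nonneg_right (by omega) (by omega)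
    have h3 : (mn + 1) * g = mn * g + g := by ring
    omega
  · intro h
    have h2 : k * g ≤ mn * g := Int.mul_le_mul_of_nonneg_right h (by omega)
    omega

theorem pv_le_iff (g mn r k : Int) (hg : 1 ≤ g) (hr0 : 0 ≤ r) (hrg : r < g) :
    mn * g + r ≤ k * g ↔ (mn < k ∨ (mn = k ∧ r = 0)) := by
  constructor
  · intro h
    rcases lt_trichotomy mn k with h1 | h1 | h1
    · exact Or.inl h1
    · subst h1; omega
    · exfalso
      have h2 : (k + 1) * g ≤ mn * g := Int.mul_le_mul_of_nonneg_right (by omega) (by omega)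
      have h3 : (k + 1) * g = k * g + g := by ring
      omega
  · rintro (h1 | ⟨rfl, rfl⟩)
    · have h2 : (mn + 1) * g ≤ k * g := Int.mul_le_mul_of_nonneg_right (by omega) (by omega)
      have h3 : (mn + 1) * g = mn * g + g := by ring
      omega
    · omega

theorem step_eq (t g : Int) (hg : 1 ≤ g) (ht : 1 - g ≤ t) (acc : List (List Int)) (x : Int) :
    (pvStepA t (acc, g) x).1 = pvStepB t acc g := by
  have hr0 : 0 ≤ PySem.Int.mod t g := by
    rw [PySem.Int.mod_eq_emod_of_pos (by omega : (0:Int) < g)]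
    exact Int.emod_nonneg t (by omega)
  have hrg : PySem.Int.mod t g < g := by
    rw [PySem.Int.mod_eq_emod_of_pos (by omega : (0:Int) < g)]
    exact Int.emod_lt_of_pos t (by omega)
  set mn := PySem.Int.floordiv t g with hmn
  set r := PySem.Int.mod t g with hr
  have heq : mn * g + r = t := PySem.Int.floordiv_mul_add_mod t g
  have hmn0 : -1 ≤ mn := (pv_ge_iff g mn r (-1) hg hr0 hrg).1 (by rw [heq]; omega)
  have hrne : mn = -1 → 1 ≤ r := by intro h; rw [h] at heq; omega
  have i3 : 3 * g ≤ t ↔ 3 ≤ mn := by rw [← heq]; exact pv_ge_iff g mn r 3 hg hr0 hrg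
  have i4 : 4 * g ≤ t ↔ 4 ≤ mn := by rw [← heq]; exact pv_ge_iff g mn r 4 hg hr0 hrg
  have i5 : 5 * g ≤ t ↔ 5 ≤ mn := by rw [← heq]; exact pv_ge_iff g mn r 5 hg hr0 hrg
  have iU : t ≤ 5 * g ↔ (mn < 5 ∨ (mn = 5 ∧ r = 0)) := by
    rw [← heq]; exact pv_le_iff g mn r 5 hg hr0 hrg
  have hgr : (g - r).toNat ≠ 0 := by omega
  unfold pvStepA pvStepB
  simp only [calcNum_closed t g hg, ← hmn, ← hr]
  rw [foldl_valid]
  set combo := List.replicate r.toNat (mn + 1) ++ List.replicate (g - r).toNat mn with hcombo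
  have hmem : ∀ c : Int, c ∈ combo ↔ ((r ≠ 0 ∧ c = mn + 1) ∨ c = mn) := by
    intro c
    simp only [hcombo, List.mem_append, List.mem_replicate]
    constructor
    · rintro (⟨h1, h2⟩ | ⟨h1, h2⟩)
      · exact Or.inl ⟨by omega, h2⟩
      · exact Or.inr h2
    · rintro (⟨h1, h2⟩ | h2)
      · exact Or.inl ⟨by omega, h2⟩
      · exact Or.inr ⟨hgr, h2⟩
  by_cases hv : 3 * g ≤ t ∧ t ≤ 5 * g
  · -- valid: A's checks pass and both append the same list
    have hmn3 : 3 ≤ mn := i3.1 hv.1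
    have hup : mn < 5 ∨ (mn = 5 ∧ r = 0) := iU.1 hv.2
    have hall : combo.all (fun x => decide (x ≤ 5)) = true := by
      simp only [List.all_eq_true, decide_eq_true_eq]
      intro c hc
      rcases (hmem c).1 hc with ⟨hz, rfl⟩ | rfl <;> omega
    have hc012 : (combo.contains 0 || combo.contains 1 || combo.contains 2) = false := by
      simp only [List.contains_eq_mem, Bool.or_eq_false_iff, decide_eq_false_iff_not, hmem]
      omega
    rw [hc012, hall]
    simp only [Bool.and_true]
    rw [if_pos hv]
    have hsv : (if t < 4 * g then (3:Int) else if t < 5 * g then 4 else 5) = mn := by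
      split_ifs with h4 h5 <;> omega
    show (acc ++ [combo], g - 1).1
        = acc ++ [List.replicate (t - (if t < 4 * g then (3:Int) else if t < 5 * g then 4 else 5) * g).toNat
              ((if t < 4 * g then (3:Int) else if t < 5 * g then 4 else 5) + 1)
            ++ List.replicate (((if t < 4 * g then (3:Int) else if t < 5 * g then 4 else 5) + 1) * g - t).toNat
              (if t < 4 * g then (3:Int) else if t < 5 * g then 4 else 5)]
    rw [hsv]
    have hexp : (mn + 1) * g = mn * g + g := by ring
    rw [hexp]
    have h1 : r.toNat = (t - mn * g).toNat := by omega
    have h2 : (g - r).toNat = (mn * g + g - t).toNat := by omega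
    show acc ++ [combo] = _
    rw [hcombo, h1, h2]
  · -- invalid: A's checks reject, B's interval test rejects
    rw [if_neg hv]
    have hbad : mn ≤ 2 ∨ (5 ≤ mn ∧ ¬(mn = 5 ∧ r = 0)) := by omega
    rcases hbad with hlow | ⟨h5, hne⟩
    · have hc012 : (combo.contains 0 || combo.contains 1 || combo.contains 2) = true := by
        simp only [List.contains_eq_mem, Bool.or_eq_true, decide_eq_true_eq, hmem]
        omega
      rw [hc012]
      simp
    · have hall : combo.all (fun x => decide (x ≤ 5)) = false := by
        rw [List.all_eq_false]
        by_cases h6 : 6 ≤ mn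
        · refine ⟨mn, (hmem mn).2 (Or.inr rfl), by simp; omega⟩
        · have hm5 : mn = 5 := by omega
          have hr5 : r ≠ 0 := by intro hz; exact hne ⟨hm5, hz⟩
          refine ⟨mn + 1, (hmem (mn + 1)).2 (Or.inl ⟨hr5, rfl⟩), by simp; omega⟩
      rw [hall]
      simp

theorem loop_eq (t : Int) : ∀ (l : List Int) (g : Int) (acc : List (List Int)),
    (l.length : Int) ≤ g → (l.length : Int) - g ≤ t →
    (l.foldl (pvStepA t) (acc, g)).1
      = (PySem.List.pyRange g (g - l.length) (-1)).foldl (pvStepB t) acc := by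
  intro l
  induction l with
  | nil =>
    intro g acc _ _
    simp [PySem.List.pyRange_neg_one_eq_nil (le_refl g)]
  | cons a l ih =>
    intro g acc hlen hgt
    have hg : 1 ≤ g := by
      simp only [List.length_cons] at hlen
      omega
    have hlt : g - (a :: l).length < g := by
      simp only [List.length_cons]
      push_cast
      omega
    rw [PySem.List.pyRange_neg_one_cons hlt, List.foldl_cons, List.foldl_cons]
    have hstep : pvStepA t (acc, g) a = (pvStepB t acc g, g - 1) := by
      have h1 := step_eq t g hg (by simp only [List.length_cons] at hgt; push_cast at hgt; omega) acc a
      have h2 : (pvStepA t (acc, g) a).2 = g - 1 := rfl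
      exact Prod.ext h1 h2
    rw [hstep]
    have := ih (g - 1) (pvStepB t acc g)
      (by simp only [List.length_cons] at hlen; push_cast at hlen ⊢; omega)
      (by simp only [List.length_cons] at hgt; push_cast at hgt ⊢; omega)
    rw [this]
    congr 1
    simp only [List.length_cons]
    push_cast
    ring

-- ===== VERDICT (by name: the statement is the Claim_ definition above) =====
theorem calcTeamsOnPitchesCombos_spec : Claim_equal_calcTeamsOnPitchesCombos := by
  intro t p s _ hpre
  unfold Spec_calcTeamsOnPitchesCombos calcTeamsOnPitchesCombos calcTeamsOnPitchesCombos_alt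
  by_cases hp : p ≤ 0
  · rw [PySem.List.pyRange_one_eq_nil (by omega : s + p ≤ s),
      PySem.List.pyRange_neg_one_eq_nil (by omega : p * s ≤ p * s - p)]
    rfl
  · have hp1 : 1 ≤ p := by omega
    obtain ⟨hs1, ht⟩ : 1 ≤ s ∧ p - p * s ≤ t := by
      rcases hpre with h | h
      · omega
      · exact h
    have hps : p ≤ p * s := le_mul_of_one_le_right (by omega) hs1
    have hlen : (((PySem.List.pyRange s (s + p) 1).length : Int)) = p := by
      rw [PySem.List.length_pyRange_one]
      omega
    rw [loop_eq t _ (p * s) [] (by rw [hlen]; exact hps) (by rw [hlen]; omega), hlen]
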